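-- pv_equiv track=rewrite | github.com/shoark7/algorithm-with-python | problems_solving/algospot/dragon.py | dragon_maker
-- ===== SOURCE A (Python) =====
-- def dragon_maker(seed, generations, p, l):
--     EXPAND_X = 'X+YF'
--     EXPAND_Y = 'FX-Y'
--     len_cache = [-1 for _ in range(generations+1)]
--     len_cache[0] = 1
--     ans = ''
--
--     for i in range(1, generations+1):
--         len_cache[i] = len_cache[i-1] * 2 + 2
--
--     def expand(string, generations, skip):
--         if generations == 0:
--             return string[skip] if skip < len(string) else ''
--
--         for i in range(len(string)):
--             if string[i] == 'X' or string[i] == 'Y':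
--                 if skip >= len_cache[generations]:
--                     skip -= len_cache[generations]
--                 elif string[i] == 'X':
--                     return expand(EXPAND_X, generations-1, skip)
--                 else:
--                     return expand(EXPAND_Y, generations-1, skip)
--             elif skip > 0:
--                 skip -= 1
--             else:
--                 return string[i]
--
--     for i in range(l):
--         ans += expand(seed, generations, p-1+i)
--     return ans
-- ===== SOURCE B (Python) =====
-- def dragon_maker(seed, generations, p, l):
--     # One X/Y expands after g generations to a block of length 3*2^g - 2.
--     # Instead of re-expanding grammar strings recursively, navigate the implicit
--     # expansion tree by pure index arithmetic, one iterative descent per output char.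
--     size = 3 * (1 << generations) - 2
--     out = []
--     for k in range(l):
--         idx = p - 1 + k
--         # locate the seed character whose block covers idx
--         ch = None
--         for c in seed:
--             w = size if c in 'XY' else 1
--             if idx < w:
--                 ch = c
--                 break
--             idx -= w
--         if ch is None:
--             out.append('')  # past the end of the full expansion
--             continue
--         lvl, cur = generations, size
--         while lvl > 0 and ch in 'XY':
--             sub = (cur - 2) // 2          # block length of each child X/Y
--             if ch == 'X':                  # 'X' -> 'X+YF' : [X:sub]['+'][Y:sub]['F']
--                 if idx < sub:
--                     pass
--                 elif idx == sub:
--                     ch = '+'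
--                 elif idx < 2 * sub + 1:
--                     ch, idx = 'Y', idx - sub - 1
--                 else:
--                     ch = 'F'
--             else:                          # 'Y' -> 'FX-Y' : ['F'][X:sub]['-'][Y:sub]
--                 if idx == 0:
--                     ch = 'F'
--                 elif idx < sub + 1:
--                     ch, idx = 'X', idx - 1
--                 elif idx == sub + 1:
--                     ch = '-'
--                 else:
--                     ch, idx = 'Y', idx - sub - 2
--             lvl, cur = lvl - 1, sub
--         out.append(ch)
--     return ''.join(out)
-- ===== Notes on version B (the rewrite author's own statement) =====
-- stated objective: alternative
-- what changed: Replaces A's memoised length table plus recursive re-expansion of the grammar strings by the closed-form block size 3*2^g-2 and a purely arithmetic, iterative descent through the implicit expansion tree for each output character.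
-- outside the precondition, e.g. on dragon_maker('FX', 0, 0, 1): A returns 'X', B returns 'F'
import Mathlib
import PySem

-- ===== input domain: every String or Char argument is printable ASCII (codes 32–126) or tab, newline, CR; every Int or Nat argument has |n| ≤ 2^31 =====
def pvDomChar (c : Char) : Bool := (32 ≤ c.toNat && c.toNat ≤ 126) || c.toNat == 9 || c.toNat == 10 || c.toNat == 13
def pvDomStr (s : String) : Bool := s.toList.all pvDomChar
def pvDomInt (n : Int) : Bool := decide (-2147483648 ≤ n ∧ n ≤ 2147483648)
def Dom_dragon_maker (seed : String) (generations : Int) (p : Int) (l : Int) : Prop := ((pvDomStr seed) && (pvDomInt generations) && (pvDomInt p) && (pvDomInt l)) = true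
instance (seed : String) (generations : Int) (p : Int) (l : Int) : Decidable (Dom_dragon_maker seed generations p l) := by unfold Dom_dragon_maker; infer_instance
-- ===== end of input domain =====

-- B replaces A's recursive re-expansion of the grammar strings (with a memoised length table)
-- by a closed-form block size 3*2^g-2 and a purely arithmetic iterative descent per output
-- character (objective: alternative; equivalence is about the return value only).

-- ===== PORT A =====
-- len_cache = [-1]*(generations+1); len_cache[0] = 1; for i in range(1,generations+1): ...
-- (for generations < 0 Python raises IndexError on the empty list — outside Pre_;
--  the port's .set 0 is then a no-op on [])
def pvCacheA (generations : Int) : List Int :=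
  ((PySem.List.pyRange 1 (generations + 1) 1).foldl
    (fun acc i => acc.set i.toNat ((acc.getD (i.toNat - 1) 0) * 2 + 2))
    ((List.replicate (generations + 1).toNat (-1 : Int)).set 0 1))

-- def expand(string, generations, skip): strings are carried as List Char, a returned
-- character is [c] and the returned '' is []; Python's implicit `return None` (the inner
-- for-loop falling off the end) is `none`, as is the IndexError of string[skip] for
-- skip < -len (both outside Pre_).  generations is ≥ 0 on every reachable call (A raised
-- already for generations < 0), so it is carried as a Nat.
mutual
def pvExpandA (cache : List Int) : Nat → List Char → Int → Option (List Char)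
  | 0, s, sk =>
      if sk < (s.length : Int) then
        match PySem.List.pyGet? s sk with
        | some c => some [c]
        | none => none
      else some []
  | (g+1), s, sk => pvLoopA cache g s sk
termination_by g _ _ => (g, 1, 0)
-- the for-loop of expand, at generations = g+1 (so the X/Y width is len_cache[g+1])
def pvLoopA (cache : List Int) (g : Nat) : List Char → Int → Option (List Char)
  | [], _ => none
  | c :: rest, sk =>
      if c = 'X' ∨ c = 'Y' then
        if cache.getD (g+1) 0 ≤ sk then pvLoopA cache g rest (sk - cache.getD (g+1) 0)
        else if c = 'X' then pvExpandA cache g "X+YF".toList sk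
        else pvExpandA cache g "FX-Y".toList sk
      else if 0 < sk then pvLoopA cache g rest (sk - 1)
      else some [c]
termination_by s _ => (g + 1, 0, s.length + 1)
end

def dragon_maker (seed : String) (generations : Int) (p : Int) (l : Int) : String :=
  let cache := pvCacheA generations
  -- for i in range(l): ans += expand(seed, generations, p-1+i)   (`ans += None` raises: none)
  let ans := (PySem.List.pyRange 0 l 1).foldl
    (fun acc i =>
      match acc, pvExpandA cache generations.toNat seed.toList (p - 1 + i) with
      | some a, some e => some (a ++ e)
      | _, _ => none)
    (some ([] : List Char))
  String.ofList (ans.getD [])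

-- ===== PORT B =====
-- find the seed character whose expansion block covers idx (width: size for X/Y, 1 otherwise)
def pvLocateB (size : Int) : List Char → Int → Option (Char × Int)
  | [], _ => none
  | c :: rest, idx =>
      let w := if c = 'X' ∨ c = 'Y' then size else 1
      if idx < w then some (c, idx) else pvLocateB size rest (idx - w)

-- while lvl > 0 and ch in 'XY': arithmetic descent; sub = (cur-2)//2
def pvDescendB : Nat → Int → Char → Int → Char
  | 0, _, ch, _ => ch
  | (lvl+1), cur, ch, idx =>
      if ch = 'X' ∨ ch = 'Y' then
        let sub := PySem.Int.floordiv (cur - 2) 2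
        if ch = 'X' then
          if idx < sub then pvDescendB lvl sub 'X' idx
          else if idx = sub then pvDescendB lvl sub '+' idx
          else if idx < 2*sub + 1 then pvDescendB lvl sub 'Y' (idx - sub - 1)
          else pvDescendB lvl sub 'F' idx
        else
          if idx = 0 then pvDescendB lvl sub 'F' idx
          else if idx < sub + 1 then pvDescendB lvl sub 'X' (idx - 1)
          else if idx = sub + 1 then pvDescendB lvl sub '-' idx
          else pvDescendB lvl sub 'Y' (idx - sub - 2)
      else ch

-- size = 3*(1<<generations)-2; for generations < 0 Python raises (outside Pre_), so toNat is exact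
def dragon_maker_alt (seed : String) (generations : Int) (p : Int) (l : Int) : String :=
  let size : Int := 3 * 2 ^ generations.toNat - 2
  let out := (PySem.List.pyRange 0 l 1).foldl
    (fun acc k =>
      match pvLocateB size seed.toList (p - 1 + k) with
      | none => acc ++ [([] : List Char)]
      | some (ch, idx) => acc ++ [[pvDescendB generations.toNat size ch idx]])
    ([] : List (List Char))
  String.ofList (PySem.Chars.join [] out)

-- ===== PRECONDITION & SPEC =====
-- total length of the generations-fold expansion of seed (each X/Y grows to 3*2^g-2 chars)
def pvTotalLen (seed : String) (g : Nat) : Int :=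
  (seed.toList.map (fun c => if c = 'X' ∨ c = 'Y' then 3 * 2 ^ g - 2 else (1 : Int))).sum

-- Pre_ excludes (a) generations < 0, where A raises IndexError; (b) for l ≥ 1, positions
-- p < 1, outside the 1-based position domain, where A either raises IndexError or returns
-- characters picked by Python's negative-index wraparound; (c) for l ≥ 1 and generations ≥ 1,
-- queries past the end of the full expansion, where A raises TypeError (ans += None).
def Pre_dragon_maker (seed : String) (generations : Int) (p : Int) (l : Int) : Prop :=
  0 ≤ generations ∧
    (l ≤ 0 ∨ (1 ≤ p ∧ (generations = 0 ∨ p - 1 + l ≤ pvTotalLen seed generations.toNat)))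
instance (seed : String) (generations : Int) (p : Int) (l : Int) : Decidable (Pre_dragon_maker seed generations p l) := by unfold Pre_dragon_maker; infer_instance

def pvWitness_dragon_maker : String × Int × Int × Int := ("FX+Y", 2, 3, 5)

def Spec_dragon_maker (seed : String) (generations : Int) (p : Int) (l : Int) (out : String) : Prop := out = dragon_maker_alt seed generations p l
instance (seed : String) (generations : Int) (p : Int) (l : Int) (out : String) : Decidable (Spec_dragon_maker seed generations p l out) := by unfold Spec_dragon_maker; infer_instance

-- ===== CLAIM (what is proved, stated in full; the proofs are below) =====
def Claim_equal_dragon_maker : Prop := ∀ (seed : String) (generations : Int) (p : Int) (l : Int), Dom_dragon_maker seed generations p l → Pre_dragon_maker seed generations p l → Spec_dragon_maker seed generations p l (dragon_maker seed generations p l)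

-- ===== LEMMAS AND PROOFS =====

-- block length of the g-fold expansion of one X or Y
def pvC (g : Nat) : Int := 3 * 2 ^ g - 2

theorem pvTwoPow (g : Nat) : (1 : Int) ≤ 2 ^ g := by
  induction g with
  | zero => norm_num
  | succ n ih => rw [pow_succ]; linarith

theorem pvC_pos (g : Nat) : 1 ≤ pvC g := by
  have := pvTwoPow g; unfold pvC; linarith

theorem pvC_succ (g : Nat) : pvC (g+1) = 2 * pvC g + 2 := by
  unfold pvC; rw [pow_succ]; ring

theorem pvSub_eq (g : Nat) : PySem.Int.floordiv (pvC (g+1) - 2) 2 = pvC g := by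
  rw [PySem.Int.floordiv_eq_ediv_of_pos (by norm_num), pvC_succ]
  generalize pvC g = x
  omega

theorem pvCache_aux (m : Nat) : ∀ k, k ≤ m →
    ((List.range k).map (fun j : Nat => (1:Int) + j)).foldl
      (fun acc i => acc.set i.toNat ((acc.getD (i.toNat - 1) 0) * 2 + 2))
      ((List.replicate (m+1) (-1 : Int)).set 0 1)
    = (List.range (k+1)).map (fun i => pvC i) ++ List.replicate (m-k) (-1) := by
  intro k hk
  induction k with
  | zero =>
    simp [List.replicate_succ, pvC]
  | succ k ih =>
    rw [List.range_succ, List.map_append, List.foldl_append, ih (by omega)]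
    simp only [List.map_cons, List.map_nil, List.foldl_cons, List.foldl_nil]
    have ht : ((1:Int) + k).toNat = k + 1 := by omega
    rw [ht]
    have hlen : ((List.range (k+1)).map (fun i => pvC i)).length = k + 1 := by simp
    have hgetD : (((List.range (k+1)).map (fun i => pvC i)) ++ List.replicate (m-k) (-1:Int)).getD (k+1-1) 0 = pvC k := by
      rw [List.getD_append _ _ _ _ (by simp)]
      simp [List.getD_eq_getElem?_getD]
    rw [hgetD]
    have hrep : List.replicate (m-k) (-1:Int) = -1 :: List.replicate (m-(k+1)) (-1) := by
      rw [← List.replicate_succ]; congr 1; omega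
    rw [hrep, List.range_succ (n := k+1), List.map_append]
    rw [List.set_append_right _ _ (by omega)]
    simp [hlen, pvC_succ]
    ring

theorem pvCacheA_spec (m : Nat) :
    pvCacheA (m : Int) = (List.range (m+1)).map (fun i => pvC i) := by
  unfold pvCacheA
  rw [PySem.List.pyRange_one]
  have h1 : ((m:Int) + 1 - 1).toNat = m := by omega
  have h2 : ((m:Int) + 1).toNat = m + 1 := by omega
  rw [h1, h2]
  have := pvCache_aux m m le_rfl
  simpa using this

theorem pvCacheA_getD (m i : Nat) (h : i ≤ m) :
    (pvCacheA (m : Int)).getD i 0 = pvC i := by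
  rw [pvCacheA_spec]
  rw [List.getD_eq_getElem?_getD, List.getElem?_map, List.getElem?_range (by omega)]
  rfl

theorem pvDescendB_nonXY (lvl : Nat) (cur : Int) (ch : Char) (idx : Int)
    (h : ¬ (ch = 'X' ∨ ch = 'Y')) : pvDescendB lvl cur ch idx = ch := by
  cases lvl <;> simp [pvDescendB, h]

-- the heart: A's recursive expansion of 'X+YF'/'FX-Y' equals B's arithmetic descent
theorem pvExpand_eq (m : Nat) : ∀ g : Nat, g + 1 ≤ m → ∀ ch : Char, (ch = 'X' ∨ ch = 'Y') →
    ∀ r : Int, 0 ≤ r → r < pvC (g+1) →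
    pvExpandA (pvCacheA (m : Int)) g (if ch = 'X' then "X+YF".toList else "FX-Y".toList) r
      = some [pvDescendB (g+1) (pvC (g+1)) ch r] := by
  intro g
  induction g with
  | zero =>
    intro hm ch hch r h0 hr
    have h4 : pvC 1 = 4 := by norm_num [pvC]
    rw [h4] at hr
    rcases hch with h | h <;> subst h <;> interval_cases r <;>
      simp [pvExpandA, pvDescendB, PySem.List.pyGet?, PySem.List.pyIdx?, PySem.Int.floordiv, pvC]
  | succ g ih =>
    intro hm ch hch r h0 hr
    have hc := pvCacheA_getD m (g+1) (by omega)
    have hC1 : 1 ≤ pvC (g+1) := pvC_pos _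
    rw [pvC_succ] at hr
    have hsub : PySem.Int.floordiv (pvC (g+1+1) - 2) 2 = pvC (g+1) := pvSub_eq _
    have cP : ('+' = 'X' ∨ '+' = 'Y') = False := by simp
    have cF : ('F' = 'X' ∨ 'F' = 'Y') = False := by simp
    have cM : ('-' = 'X' ∨ '-' = 'Y') = False := by simp
    have cYX : ('Y' = 'X') = False := by simp
    rcases hch with h | h <;> subst h
    · -- ch = 'X', string "X+YF"
      rw [show (if 'X' = 'X' then "X+YF".toList else "FX-Y".toList) = ['X','+','Y','F'] from rfl]
      simp only [pvExpandA]
      rw [pvDescendB, pvLoopA]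
      simp only [hc, hsub, true_or, if_true]
      by_cases h1 : r < pvC (g+1)
      · rw [if_neg (by omega), if_pos h1]
        exact ih (by omega) 'X' (Or.inl rfl) r h0 h1
      · by_cases h2 : r = pvC (g+1)
        · rw [if_pos (by omega), if_neg h1, if_pos h2, pvLoopA]
          simp only [cP, if_false]
          rw [if_neg (by omega)]
          simp [pvDescendB_nonXY]
        · by_cases h3 : r < 2 * pvC (g+1) + 1
          · rw [if_pos (by omega), if_neg h1, if_neg h2, if_pos h3, pvLoopA]
            simp only [cP, if_false]
            rw [if_pos (by omega), pvLoopA]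
            simp only [or_true, if_true, cYX, if_false, hc]
            rw [if_neg (by omega)]
            exact ih (by omega) 'Y' (Or.inr rfl) (r - pvC (g+1) - 1) (by omega) (by omega)
          · rw [if_pos (by omega), if_neg h1, if_neg h2, if_neg h3, pvLoopA]
            simp only [cP, if_false]
            rw [if_pos (by omega), pvLoopA]
            simp only [or_true, if_true, cYX, if_false, hc]
            rw [if_pos (by omega), pvLoopA]
            simp only [cF, if_false]
            rw [if_neg (by omega)]
            simp [pvDescendB_nonXY]
    · -- ch = 'Y', string "FX-Y"
      rw [show (if 'Y' = 'X' then "X+YF".toList else "FX-Y".toList) = ['F','X','-','Y'] from rfl]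
      simp only [pvExpandA]
      rw [pvDescendB, pvLoopA]
      simp only [hc, hsub, or_true, if_true, cF, cYX, if_false]
      by_cases h1 : r = 0
      · rw [if_neg (by omega), if_pos h1]
        simp [pvDescendB_nonXY]
      · by_cases h2 : r < pvC (g+1) + 1
        · rw [if_pos (by omega), if_neg h1, if_pos h2, pvLoopA]
          simp only [true_or, if_true, hc]
          rw [if_neg (by omega)]
          exact ih (by omega) 'X' (Or.inl rfl) (r - 1) (by omega) (by omega)
        · by_cases h3 : r = pvC (g+1) + 1
          · rw [if_pos (by omega), if_neg h1, if_neg h2, if_pos h3, pvLoopA]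
            simp only [true_or, if_true, hc]
            rw [if_pos (by omega), pvLoopA]
            simp only [cM, if_false]
            rw [if_neg (by omega)]
            simp [pvDescendB_nonXY]
          · rw [if_pos (by omega), if_neg h1, if_neg h2, if_neg h3, pvLoopA]
            simp only [true_or, if_true, hc]
            rw [if_pos (by omega), pvLoopA]
            simp only [cM, if_false]
            rw [if_pos (by omega), pvLoopA]
            simp only [or_true, if_true, cYX, if_false, hc]
            rw [if_neg (by omega)]
            rw [show r - 1 - pvC (g+1) - 1 = r - pvC (g+1) - 2 from by ring]
            exact ih (by omega) 'Y' (Or.inr rfl) (r - pvC (g+1) - 2) (by omega) (by omega)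

-- A's seed-scanning loop equals B's locate-then-descend
theorem pvLoop_eq (m g : Nat) (h : g + 1 ≤ m) : ∀ (cs : List Char) (s : Int), 0 ≤ s →
    pvLoopA (pvCacheA (m : Int)) g cs s
      = (match pvLocateB (pvC (g+1)) cs s with
         | some (ch, r) => some [pvDescendB (g+1) (pvC (g+1)) ch r]
         | none => none) := by
  intro cs
  induction cs with
  | nil => intro s h0; simp [pvLoopA, pvLocateB]
  | cons c rest ih =>
    intro s h0
    have hc := pvCacheA_getD m (g+1) (by omega)
    have hC1 : 1 ≤ pvC (g+1) := pvC_pos _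
    rw [pvLoopA, pvLocateB]
    by_cases hxy : c = 'X' ∨ c = 'Y'
    · rw [if_pos hxy, if_pos hxy, hc]
      by_cases hlt : s < pvC (g+1)
      · rw [if_neg (by omega), if_pos hlt]
        rcases hxy with h | h <;> subst h
        · rw [if_pos rfl]
          exact pvExpand_eq m g (by omega) 'X' (Or.inl rfl) s h0 hlt
        · rw [if_neg (by decide)]
          exact pvExpand_eq m g (by omega) 'Y' (Or.inr rfl) s h0 hlt
      · rw [if_pos (by omega), if_neg hlt]
        exact ih (s - pvC (g+1)) (by omega)
    · rw [if_neg hxy, if_neg hxy]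
      by_cases hz : 0 < s
      · rw [if_pos hz, if_neg (by omega)]
        exact ih (s - 1) (by omega)
      · rw [if_neg hz, if_pos (by omega)]
        simp [pvDescendB_nonXY _ _ _ _ hxy]

theorem pvLocate_isSome (size : Int) (_hs : 1 ≤ size) :
    ∀ (cs : List Char) (s : Int), 0 ≤ s →
    s < (cs.map (fun c => if c = 'X' ∨ c = 'Y' then size else (1 : Int))).sum →
    (pvLocateB size cs s).isSome := by
  intro cs
  induction cs with
  | nil => intro s h0 hlt; simp at hlt; omega
  | cons c rest ih =>
    intro s h0 hlt
    rw [pvLocateB]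
    simp only [List.map_cons, List.sum_cons] at hlt
    by_cases hxy : c = 'X' ∨ c = 'Y'
    · rw [if_pos hxy]; rw [if_pos hxy] at hlt
      by_cases hf : s < size
      · rw [if_pos hf]; rfl
      · rw [if_neg hf]; exact ih _ (by omega) (by omega)
    · rw [if_neg hxy]; rw [if_neg hxy] at hlt
      by_cases hf : s < 1
      · rw [if_pos hf]; rfl
      · rw [if_neg hf]; exact ih _ (by omega) (by omega)

-- g = 0: A returns the seed character itself (or '' past the end), B locates with width 1
theorem pvLocate_one : ∀ (cs : List Char) (n : Nat),
    pvLocateB 1 cs (n : Int) = (cs[n]?).map (fun c => (c, (0 : Int))) := by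
  intro cs
  induction cs with
  | nil => intro n; simp [pvLocateB]
  | cons c rest ih =>
    intro n
    rw [pvLocateB]
    simp only [ite_self]
    cases n with
    | zero => norm_num
    | succ n =>
      rw [if_neg (by push_cast; omega)]
      have : ((n+1 : Nat) : Int) - 1 = (n : Int) := by push_cast; omega
      rw [this, ih]
      simp

theorem pvExpandA_zero (cache : List Int) (cs : List Char) (n : Nat) :
    pvExpandA cache 0 cs (n : Int) = some ((cs[n]?).elim [] (fun c => [c])) := by
  by_cases h : n < cs.length
  · have h0 : (0:Int) ≤ (n:Int) := by positivity
    have h1 : (n:Int) < (cs.length : Int) := by exact_mod_cast h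
    simp only [pvExpandA, if_pos h1,
      PySem.List.pyGet?_eq_some_getElem cs h0 (by simpa using h1)]
    simp [List.getElem?_eq_getElem h]
  · have h1 : ¬ ((n:Int) < (cs.length : Int)) := by exact_mod_cast h
    simp only [pvExpandA, if_neg h1]
    simp [List.getElem?_eq_none (Nat.le_of_not_lt h)]

-- A's option-threaded accumulation over the output loop
theorem pvFoldA : ∀ (rng : List Int) (f : Int → Option (List Char)) (h : Int → List Char),
    (∀ i ∈ rng, f i = some (h i)) → ∀ acc : List Char,
    List.foldl (fun a i => match a, f i with
                 | some x, some e => some (x ++ e)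
                 | _, _ => none) (some acc) rng
      = some (acc ++ (rng.map h).flatten) := by
  intro rng
  induction rng with
  | nil => intro f h _ acc; simp
  | cons i rest ih =>
    intro f h hfh acc
    simp only [List.foldl_cons, hfh i (by simp), List.map_cons, List.flatten_cons]
    rw [ih f h (fun j hj => hfh j (by simp [hj])) (acc ++ h i)]
    simp

theorem pvJoinNil (ps : List (List Char)) : PySem.Chars.join [] ps = ps.flatten := by
  induction ps with
  | nil => exact PySem.Chars.join_nil []
  | cons p ps ih =>
    cases ps with
    | nil => simp [PySem.Chars.join_singleton]
    | cons q rest => rw [PySem.Chars.join_cons_cons]; simp_all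

-- the value B appends for query index s
def pvBChar (sz : Int) (m : Nat) (cs : List Char) (s : Int) : List Char :=
  match pvLocateB sz cs s with
  | some (ch, idx) => [pvDescendB m sz ch idx]
  | none => []

-- per-query agreement of the two programs
theorem pvPerIndex (m : Nat) (cs : List Char) (s : Int) (h0 : 0 ≤ s)
    (hok : m = 0 ∨ s < (cs.map (fun c => if c = 'X' ∨ c = 'Y' then pvC m else (1:Int))).sum) :
    pvExpandA (pvCacheA (m : Int)) m cs s = some (pvBChar (pvC m) m cs s) := by
  cases m with
  | zero =>
    obtain ⟨n, rfl⟩ : ∃ n : Nat, s = (n : Int) := ⟨s.toNat, by omega⟩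
    rw [pvExpandA_zero]
    unfold pvBChar
    have h1 : pvC 0 = 1 := by norm_num [pvC]
    rw [h1, pvLocate_one]
    cases cs[n]? <;> simp [pvDescendB]
  | succ g =>
    rcases hok with h | hok; · omega
    have hs' := pvLocate_isSome (pvC (g+1)) (pvC_pos _) cs s h0 hok
    simp only [pvExpandA]
    rw [pvLoop_eq (g+1) g le_rfl cs s h0]
    unfold pvBChar
    obtain ⟨⟨ch, idx⟩, hsome⟩ := Option.isSome_iff_exists.mp hs'
    rw [hsome]

-- ===== VERDICT (by name: the statement is the Claim_ definition above) =====
theorem dragon_maker_spec : Claim_equal_dragon_maker := by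
  unfold Claim_equal_dragon_maker
  intro seed G p l hdom hpre
  obtain ⟨hg, hrest⟩ := hpre
  unfold Spec_dragon_maker dragon_maker dragon_maker_alt
  have hGm : G = ((G.toNat : Nat) : Int) := (Int.toNat_of_nonneg hg).symm
  rw [hGm] at hrest ⊢
  set m : Nat := G.toNat with hm
  simp only [Int.toNat_natCast] at hrest ⊢
  by_cases hl : l ≤ 0
  · rw [PySem.List.pyRange_one_eq_nil hl]
    simp [PySem.Chars.join_nil]
  · rcases hrest with hl0 | ⟨hp, hbound⟩; · omega
    have hH : ∀ i ∈ PySem.List.pyRange 0 l 1,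
        pvExpandA (pvCacheA (m : Int)) m seed.toList (p - 1 + i)
          = some (pvBChar (pvC m) m seed.toList (p - 1 + i)) := by
      intro i hi
      have hmem := (PySem.List.mem_pyRange_one).mp hi
      refine pvPerIndex m seed.toList (p - 1 + i) (by omega) ?_
      rcases hbound with h0 | hb
      · left; omega
      · right
        have : pvTotalLen seed m
            = (seed.toList.map (fun c => if c = 'X' ∨ c = 'Y' then pvC m else (1:Int))).sum := rfl
        rw [this] at hb
        omega
    rw [pvFoldA (PySem.List.pyRange 0 l 1)
        (fun i => pvExpandA (pvCacheA (m : Int)) m seed.toList (p - 1 + i))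
        (fun i => pvBChar (pvC m) m seed.toList (p - 1 + i)) hH []]
    have hfun : (fun (acc : List (List Char)) k =>
        match pvLocateB (3 * 2 ^ m - 2) seed.toList (p - 1 + k) with
        | none => acc ++ [([] : List Char)]
        | some (ch, idx) => acc ++ [[pvDescendB m (3 * 2 ^ m - 2) ch idx]])
        = fun (acc : List (List Char)) k => acc ++ [pvBChar (pvC m) m seed.toList (p - 1 + k)] := by
      funext acc k
      cases hx : pvLocateB (3 * 2 ^ m - 2) seed.toList (p - 1 + k) with
      | none => simp only [pvBChar, pvC]; rw [hx]
      | some v => cases v with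
        | mk ch idx => simp only [pvBChar, pvC]; rw [hx]
    rw [hfun, PySem.List.foldl_append_singleton_eq_map]
    simp [pvJoinNil]
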